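-- pv_equiv track=rewrite | github.com/hreoicage/yolov3 | mao/complete_xzny.py | handlepageurl
-- ===== SOURCE A (Python) =====
-- def handlepageurl(pageurl):
--     if pageurl is None or pageurl == "":
--         return ""
--     urls = pageurl.split("/")
--     tmp = ""
--     for index in range(0, len(urls) - 1):
--         tmp = tmp + urls[index] + "/"
--     return tmp
-- ===== SOURCE B (Python) =====
-- def handlepageurl(pageurl):
--     if pageurl is None or pageurl == "":
--         return ""
--     idx = pageurl.rfind("/")
--     return pageurl[:idx + 1]
-- ===== Notes on version B (the rewrite author's own statement) =====
-- stated objective: simpler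
-- what changed: replaces the split-then-rebuild loop over the URL pieces with a single rfind of the last separator and one slice up to it (rfind returning -1 when there is no separator naturally yields the empty prefix)
import Mathlib
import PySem

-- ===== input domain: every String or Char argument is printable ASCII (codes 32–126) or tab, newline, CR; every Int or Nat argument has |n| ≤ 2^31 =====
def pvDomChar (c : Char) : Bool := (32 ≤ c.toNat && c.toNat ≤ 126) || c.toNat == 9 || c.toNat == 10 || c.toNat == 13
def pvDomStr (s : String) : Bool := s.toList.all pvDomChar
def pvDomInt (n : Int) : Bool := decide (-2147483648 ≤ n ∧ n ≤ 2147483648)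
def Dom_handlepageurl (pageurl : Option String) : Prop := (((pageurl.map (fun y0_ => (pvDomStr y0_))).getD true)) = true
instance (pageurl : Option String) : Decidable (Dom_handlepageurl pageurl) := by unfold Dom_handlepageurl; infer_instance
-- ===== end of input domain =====

-- B replaces A's split-on-'/'-then-rebuild loop with one rfind of the last '/' and a single slice; objective: simpler.

-- ===== PORT A =====
def handlepageurl (pageurl : Option String) : String :=
  match pageurl with
  | none => ""
  | some s =>
    if s = "" then ""
    else
      let urls : List (List Char) := PySem.Chars.splitOn s.toList ['/']
      let tmp : List Char :=
        (PySem.List.pyRange 0 ((urls.length : Int) - 1) 1).foldl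
          (fun tmp index => tmp ++ PySem.List.pyGetD urls index [] ++ ['/']) []
      String.ofList tmp

-- ===== PORT B =====
def handlepageurl_alt (pageurl : Option String) : String :=
  match pageurl with
  | none => ""
  | some s =>
    if s = "" then ""
    else
      let idx : Int := PySem.Str.rfind s "/"
      String.ofList (PySem.Chars.slice s.toList none (some (idx + 1)))

-- ===== PRECONDITION & SPEC =====
def Spec_handlepageurl (pageurl : Option String) (out : String) : Prop := out = handlepageurl_alt pageurl
instance (pageurl : Option String) (out : String) : Decidable (Spec_handlepageurl pageurl out) := by unfold Spec_handlepageurl; infer_instance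

-- ===== CLAIM (what is proved, stated in full; the proofs are below) =====
def Claim_equal_handlepageurl : Prop := ∀ (pageurl : Option String), Dom_handlepageurl pageurl → Spec_handlepageurl pageurl (handlepageurl pageurl)

-- ===== LEMMAS AND PROOFS =====

-- reference single-character split (structural recursion, always nonempty)
def pvSp (c : Char) : List Char → List (List Char)
  | [] => [[]]
  | a :: rest =>
    if a = c then [] :: pvSp c rest
    else match pvSp c rest with
      | [] => [[a]]
      | h :: t => (a :: h) :: t

-- reference "prefix of cs up to and including the last occurrence of c"
def pvR (c : Char) : List Char → List Char
  | [] => []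
  | a :: rest => if c ∈ rest then a :: pvR c rest else if a = c then [a] else []

lemma pvSp_ne_nil (c : Char) (cs : List Char) : pvSp c cs ≠ [] := by
  cases cs with
  | nil => simp [pvSp]
  | cons a rest =>
    simp only [pvSp]
    split
    · simp
    · split <;> simp

-- one-step equations for PySem.Chars.splitOn.go specialised to a singleton separator
lemma splitOn_go_nil (c : Char) (fuel : Nat) (cur : List Char) (acc : List (List Char)) :
    PySem.Chars.splitOn.go [c] (fuel+1) [] cur acc = (cur.reverse :: acc).reverse := by
  simp [PySem.Chars.splitOn.go]

lemma splitOn_go_cons (c a : Char) (rest : List Char) (fuel : Nat) (cur : List Char)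
    (acc : List (List Char)) :
    PySem.Chars.splitOn.go [c] (fuel+1) (a :: rest) cur acc =
      (if a = c then PySem.Chars.splitOn.go [c] fuel rest [] (cur.reverse :: acc)
       else PySem.Chars.splitOn.go [c] fuel rest (a :: cur) acc) := by
  conv_lhs => rw [PySem.Chars.splitOn.go.eq_def]
  by_cases h : a = c
  · simp [List.isPrefixOf, h]
  · simp [List.isPrefixOf, h, Ne.symm h]

lemma splitOn_go_spec (c : Char) (l : List Char) :
    ∀ (fuel : Nat) (cur : List Char) (acc : List (List Char)), l.length < fuel →
      PySem.Chars.splitOn.go [c] fuel l cur acc =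
        acc.reverse ++ ((cur.reverse ++ (pvSp c l).headD []) :: (pvSp c l).tail) := by
  induction l with
  | nil =>
    intro fuel cur acc hf
    obtain ⟨f, rfl⟩ : ∃ f, fuel = f + 1 := ⟨fuel - 1, by omega⟩
    simp [splitOn_go_nil, pvSp]
  | cons a rest ih =>
    intro fuel cur acc hf
    obtain ⟨f, rfl⟩ : ∃ f, fuel = f + 1 := ⟨fuel - 1, by omega⟩
    have hrest : rest.length < f := by simpa using hf
    rw [splitOn_go_cons]
    obtain ⟨h, t, hht⟩ := List.exists_cons_of_ne_nil (pvSp_ne_nil c rest)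
    by_cases hac : a = c
    · rw [if_pos hac, ih f [] (cur.reverse :: acc) hrest]
      simp [pvSp, hac, hht]
    · rw [if_neg hac, ih f (a :: cur) acc hrest]
      simp [pvSp, hac, hht]

lemma splitOn_single (c : Char) (cs : List Char) :
    PySem.Chars.splitOn cs [c] = pvSp c cs := by
  have h := splitOn_go_spec c cs (cs.length + 1) [] [] (by omega)
  obtain ⟨h1, t1, hht⟩ := List.exists_cons_of_ne_nil (pvSp_ne_nil c cs)
  simp only [PySem.Chars.splitOn]
  rw [h, hht]
  simp

lemma pvSp_of_not_mem {c : Char} {cs : List Char} (h : c ∉ cs) : pvSp c cs = [cs] := by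
  induction cs with
  | nil => simp [pvSp]
  | cons a rest ih =>
    simp only [List.mem_cons, not_or] at h
    simp [pvSp, Ne.symm h.1, ih h.2]

lemma pvSp_two_of_mem {c : Char} {cs : List Char} (h : c ∈ cs) : 2 ≤ (pvSp c cs).length := by
  induction cs with
  | nil => simp at h
  | cons a rest ih =>
    obtain ⟨h1, t1, hht⟩ := List.exists_cons_of_ne_nil (pvSp_ne_nil c rest)
    by_cases hac : a = c
    · simp [pvSp, hac, hht]
    · have hm : c ∈ rest := by
        rcases List.mem_cons.mp h with h' | h'
        · exact absurd h'.symm hac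
        · exact h'
      have := ih hm
      rw [hht] at this
      simp only [List.length_cons] at this
      simp [pvSp, hac, hht]
      omega

lemma pvR_of_not_mem {c : Char} {cs : List Char} (h : c ∉ cs) : pvR c cs = [] := by
  cases cs with
  | nil => simp [pvR]
  | cons a rest =>
    simp only [List.mem_cons, not_or] at h
    simp [pvR, h.2, Ne.symm h.1]

-- A's rebuilt prefix, computed from the reference split, is the last-slash prefix
lemma flatten_dropLast_pvSp (c : Char) (cs : List Char) :
    (((pvSp c cs).dropLast).map (· ++ [c])).flatten = pvR c cs := by
  induction cs with
  | nil => simp [pvSp, pvR]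
  | cons a rest ih =>
    obtain ⟨h, t, hht⟩ := List.exists_cons_of_ne_nil (pvSp_ne_nil c rest)
    by_cases hac : a = c
    · have h1 : pvSp c (a :: rest) = [] :: pvSp c rest := by simp [pvSp, hac]
      rw [h1, List.dropLast_cons_of_ne_nil (pvSp_ne_nil c rest)]
      simp only [List.map_cons, List.flatten_cons, List.nil_append]
      rw [ih]
      by_cases hm : c ∈ rest
      · simp [pvR, hm, hac]
      · simp [pvR, hm, hac, pvR_of_not_mem hm]
    · have h1 : pvSp c (a :: rest) = (a :: h) :: t := by simp [pvSp, hac, hht]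
      cases t with
      | nil =>
        have hm : c ∉ rest := by
          intro hm
          have := pvSp_two_of_mem hm
          rw [hht] at this
          simp at this
        simp [h1, pvR, hm, hac]
      | cons t1 t2 =>
        have hm : c ∈ rest := by
          by_contra hm
          have := pvSp_of_not_mem hm
          rw [hht] at this
          simp at this
        have ih' := ih
        rw [hht, List.dropLast_cons_of_ne_nil (by simp : (t1 :: t2 : List (List Char)) ≠ [])] at ih'
        rw [h1, List.dropLast_cons_of_ne_nil (by simp : (t1 :: t2 : List (List Char)) ≠ [])]
        simp only [List.map_cons, List.flatten_cons] at ih' ⊢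
        rw [pvR]
        simp only [hm, if_pos]
        rw [← ih']
        simp

-- one-step equations for PySem.Chars.rfind.go specialised to a singleton needle
lemma rfind_go_zero (c a : Char) (cs : List Char) :
    PySem.Chars.rfind.go (a :: cs) [c] 0 = (if a = c then 0 else -1) := by
  simp [PySem.Chars.rfind.go, List.isPrefixOf]
  split <;> simp_all [eq_comm]

lemma rfind_go_succ (c a : Char) (cs : List Char) (j : Nat) :
    PySem.Chars.rfind.go (a :: cs) [c] (j+1) =
      (if [c].isPrefixOf (List.drop j cs) then ((j : Int) + 1)
       else PySem.Chars.rfind.go (a :: cs) [c] j) := by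
  simp [PySem.Chars.rfind.go]

lemma rfind_go_succ' (c : Char) (cs : List Char) (j : Nat) :
    PySem.Chars.rfind.go cs [c] (j+1) =
      (if [c].isPrefixOf (List.drop (j+1) cs) then ((j : Int) + 1)
       else PySem.Chars.rfind.go cs [c] j) := by
  simp [PySem.Chars.rfind.go]

lemma rfind_go_cons (c a : Char) (cs : List Char) (j : Nat) :
    PySem.Chars.rfind.go (a :: cs) [c] (j+1) =
      (if PySem.Chars.rfind.go cs [c] j = -1 then (if a = c then 0 else -1)
       else PySem.Chars.rfind.go cs [c] j + 1) := by
  induction j with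
  | zero =>
    rw [rfind_go_succ]
    simp only [List.drop_zero]
    by_cases hp : [c].isPrefixOf cs
    · have : PySem.Chars.rfind.go cs [c] 0 = 0 := by
        simp [PySem.Chars.rfind.go, hp]
      rw [if_pos hp, this]
      norm_num
    · have : PySem.Chars.rfind.go cs [c] 0 = -1 := by
        simp [PySem.Chars.rfind.go, hp]
      rw [if_neg hp, this, rfind_go_zero]
      simp
  | succ j ih =>
    rw [rfind_go_succ, rfind_go_succ' c cs j]
    by_cases hp : [c].isPrefixOf (List.drop (j+1) cs)
    · rw [if_pos hp, if_pos hp]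
      rw [if_neg (by omega : ¬ ((j : Int) + 1 = -1))]
      push_cast
      ring
    · rw [if_neg hp, if_neg hp, ih]

lemma rfind_nil (c : Char) : PySem.Chars.rfind [] [c] = -1 := by
  simp [PySem.Chars.rfind, PySem.Chars.rfind.go, List.isPrefixOf]

lemma rfind_cons (c a : Char) (cs : List Char) :
    PySem.Chars.rfind (a :: cs) [c] =
      (if PySem.Chars.rfind cs [c] = -1 then (if a = c then 0 else -1)
       else PySem.Chars.rfind cs [c] + 1) := by
  simp only [PySem.Chars.rfind, List.length_cons]
  exact rfind_go_cons c a cs cs.length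

lemma rfind_ge_neg_one (c : Char) (cs : List Char) : -1 ≤ PySem.Chars.rfind cs [c] := by
  induction cs with
  | nil => rw [rfind_nil]
  | cons a rest ih =>
    rw [rfind_cons]
    split
    · split <;> omega
    · omega

lemma rfind_eq_neg_one_iff (c : Char) (cs : List Char) :
    PySem.Chars.rfind cs [c] = -1 ↔ c ∉ cs := by
  induction cs with
  | nil => simp [rfind_nil]
  | cons a rest ih =>
    rw [rfind_cons]
    by_cases hm : PySem.Chars.rfind rest [c] = -1
    · rw [if_pos hm]
      by_cases hac : a = c
      · simp [hac]
      · simp [hac, Ne.symm hac, ih.mp hm]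
    · rw [if_neg hm]
      have := rfind_ge_neg_one c rest
      have hmem : c ∈ rest := by
        by_contra hc
        exact hm (ih.mpr hc)
      constructor
      · intro h; omega
      · intro h; exact absurd (List.mem_cons_of_mem a hmem) h

-- B's slice, computed via rfind, is the last-slash prefix
lemma take_rfind (c : Char) (cs : List Char) :
    List.take (PySem.Chars.rfind cs [c] + 1).toNat cs = pvR c cs := by
  induction cs with
  | nil => simp [pvR]
  | cons a rest ih =>
    rw [rfind_cons]
    by_cases hm : c ∈ rest
    · have hne : PySem.Chars.rfind rest [c] ≠ -1 :=
        fun hh => ((rfind_eq_neg_one_iff c rest).mp hh) hm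
      have hge : 0 ≤ PySem.Chars.rfind rest [c] := by
        have := rfind_ge_neg_one c rest; omega
      rw [if_neg hne]
      have h2 : (PySem.Chars.rfind rest [c] + 1 + 1).toNat
          = (PySem.Chars.rfind rest [c] + 1).toNat + 1 := by omega
      rw [h2, List.take_succ_cons, ih]
      simp [pvR, hm]
    · have heq : PySem.Chars.rfind rest [c] = -1 := (rfind_eq_neg_one_iff c rest).mpr hm
      rw [if_pos heq]
      by_cases hac : a = c
      · simp [hac, pvR, hm]
      · simp [hac, pvR, hm]

-- A's index loop over range(0, len(urls)-1) is the fold over urls.dropLast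
lemma loop_eq_flatten (urls : List (List Char)) (h : urls ≠ []) :
    (PySem.List.pyRange 0 ((urls.length : Int) - 1) 1).foldl
        (fun tmp index => tmp ++ PySem.List.pyGetD urls index [] ++ ['/']) []
      = ((urls.dropLast).map (· ++ ['/'])).flatten := by
  have hpos := List.length_pos_iff.mpr h
  have hl : (urls.length : Int) - 1 = (urls.dropLast.length : Int) := by
    simp only [List.length_dropLast]
    omega
  rw [hl]
  rw [PySem.List.foldl_congr_mem _ _
      (fun tmp index => tmp ++ PySem.List.pyGetD urls.dropLast index [] ++ ['/']) _
      (by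
        intro acc x hx
        rw [PySem.List.mem_pyRange_one] at hx
        have hx1 : 0 ≤ x := hx.1
        have hlt : x.toNat < urls.dropLast.length := by omega
        have hlt' : x.toNat < urls.length := by
          simp only [List.length_dropLast] at hlt; omega
        have hx' : x = ((x.toNat : Nat) : Int) := by omega
        have hkey : PySem.List.pyGetD urls x ([] : List Char)
            = PySem.List.pyGetD urls.dropLast x [] := by
          rw [hx', PySem.List.pyGetD_natCast, PySem.List.pyGetD_natCast,
              List.getD_eq_getElem urls [] hlt', List.getD_eq_getElem urls.dropLast [] hlt,
              List.getElem_dropLast]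
        simp [hkey])]
  rw [PySem.List.foldl_pyRange_zero_pyGetD' urls.dropLast []
      (fun tmp u => tmp ++ u ++ ['/']) []]
  have : ∀ (init : List Char) (l : List (List Char)),
      l.foldl (fun tmp u => tmp ++ u ++ ['/']) init = init ++ (l.map (· ++ ['/'])).flatten := by
    intro init l
    rw [show (fun (tmp u : List Char) => tmp ++ u ++ ['/'])
        = (fun (tmp u : List Char) => tmp ++ (u ++ ['/'])) from by
      funext tmp u; rw [List.append_assoc]]
    rw [PySem.List.foldl_append_eq_flatMap (· ++ ['/']) l init, List.flatMap_def]
  rw [this [] urls.dropLast]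
  simp

lemma toList_ne_nil_of_ne_empty {s : String} (h : s ≠ "") : s.toList ≠ [] := by
  intro hl
  apply h
  cases s
  simp_all

-- ===== VERDICT (by name: the statement is the Claim_ definition above) =====
theorem handlepageurl_spec : Claim_equal_handlepageurl := by
  intro pageurl _
  unfold Spec_handlepageurl handlepageurl handlepageurl_alt
  cases pageurl with
  | none => rfl
  | some s =>
    by_cases hs : s = ""
    · simp [hs]
    · simp only [hs, ite_false]
      congr 1
      have hnil : s.toList ≠ [] := toList_ne_nil_of_ne_empty hs
      rw [splitOn_single '/' s.toList,
          loop_eq_flatten (pvSp '/' s.toList) (pvSp_ne_nil '/' s.toList),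
          flatten_dropLast_pvSp '/' s.toList]
      have hslash : ("/" : String).toList = ['/'] := by decide
      rw [PySem.Str.rfind_eq, hslash,
          PySem.Chars.slice_eq_listSlice,
          PySem.List.slice_to s.toList (by have := rfind_ge_neg_one '/' s.toList; omega),
          take_rfind]
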